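-- pv_equiv track=rewrite | github.com/alis-khadka/llm_program_grader | dataset/solutions/21_22-1-1-python/2HRKTEF5.py | calc
-- ===== SOURCE A (Python) =====
-- def calc(n):
--     if n == 0:
--         return 0
--     else:
--         if n%2 == 0:
--             n = (n//2)%1000000007
--             res = (calc(n))%1000000007
--             res = (res+1)%1000000007
--             res = (res*res)%1000000007
--             return (res-1)%1000000007
--         else:
--             n = (n-1)%1000000007
--             res = calc(n)%1000000007
--             res = (res*2)%1000000007
--             return res+1
-- ===== SOURCE B (Python) =====
-- def calc(n):
--     MOD = 1000000007
--     ops = []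
--     while n != 0:
--         if n % 2 == 0:
--             ops.append(True)
--             n = (n // 2) % MOD
--         else:
--             ops.append(False)
--             n = (n - 1) % MOD
--     res = 0
--     for even in reversed(ops):
--         r = res % MOD
--         if even:
--             t = (r + 1) % MOD
--             res = (t * t % MOD - 1) % MOD
--         else:
--             res = (r * 2) % MOD + 1
--     return res
-- ===== Notes on version B (the rewrite author's own statement) =====
-- stated objective: alternative
-- what changed: Replaced A's recursion with an explicit two-phase iteration: a forward loop that reduces n while recording each step's parity on a stack, then a reverse fold that replays the recorded operations to build the result.
import Mathlib
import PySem

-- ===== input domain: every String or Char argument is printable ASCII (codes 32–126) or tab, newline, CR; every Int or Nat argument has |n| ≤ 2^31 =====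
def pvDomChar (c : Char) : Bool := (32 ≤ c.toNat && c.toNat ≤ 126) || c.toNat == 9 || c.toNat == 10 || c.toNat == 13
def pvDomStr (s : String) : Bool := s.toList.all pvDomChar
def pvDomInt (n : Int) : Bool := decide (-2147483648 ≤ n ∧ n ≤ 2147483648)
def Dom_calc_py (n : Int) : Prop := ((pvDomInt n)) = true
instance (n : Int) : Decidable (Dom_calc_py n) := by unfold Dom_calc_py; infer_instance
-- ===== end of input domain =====

-- B replaces A's recursion with an explicit forward reduction pass that records each
-- step's parity, followed by a reverse fold applying the corresponding update; same
-- values, different decomposition (objective: alternative).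
-- Both ports use a fuel counter of 128 purely as a totality guard: one step maps any
-- argument into [0, 1000000007) and the chain then strictly shrinks, so ≤ 62 steps
-- ever happen on the domain |n| ≤ 2^31 and the fuel is never exhausted there.

-- ===== PORT A =====
def pvCalcFuel : Nat → Int → Int
  | 0, _ => 0   -- fuel guard only; unreachable on the stated domain
  | fuel + 1, n =>
    if n = 0 then 0
    else
      if PySem.Int.mod n 2 = 0 then
        let n' := PySem.Int.mod (PySem.Int.floordiv n 2) 1000000007
        let res := PySem.Int.mod (pvCalcFuel fuel n') 1000000007
        let res := PySem.Int.mod (res + 1) 1000000007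
        let res := PySem.Int.mod (res * res) 1000000007
        PySem.Int.mod (res - 1) 1000000007
      else
        let n' := PySem.Int.mod (n - 1) 1000000007
        let res := PySem.Int.mod (pvCalcFuel fuel n') 1000000007
        let res := PySem.Int.mod (res * 2) 1000000007
        res + 1

def calc_py (n : Int) : Int := pvCalcFuel 128 n

-- ===== PORT B =====
-- forward pass: the while-loop that records each step's parity (true = even branch)
def pvOpsFuel : Nat → Int → List Bool
  | 0, _ => []   -- fuel guard only; unreachable on the stated domain
  | fuel + 1, n =>
    if n = 0 then []
    else
      if PySem.Int.mod n 2 = 0 then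
        true :: pvOpsFuel fuel (PySem.Int.mod (PySem.Int.floordiv n 2) 1000000007)
      else
        false :: pvOpsFuel fuel (PySem.Int.mod (n - 1) 1000000007)

-- one iteration of B's reverse for-loop
def pvApply (res : Int) (even : Bool) : Int :=
  let r := PySem.Int.mod res 1000000007
  if even then
    let t := PySem.Int.mod (r + 1) 1000000007
    PySem.Int.mod (PySem.Int.mod (t * t) 1000000007 - 1) 1000000007
  else
    PySem.Int.mod (r * 2) 1000000007 + 1

def calc_py_alt (n : Int) : Int :=
  (pvOpsFuel 128 n).reverse.foldl pvApply 0

-- ===== PRECONDITION & SPEC =====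
def Spec_calc_py (n : Int) (out : Int) : Prop := out = calc_py_alt n
instance (n : Int) (out : Int) : Decidable (Spec_calc_py n out) := by unfold Spec_calc_py; infer_instance

-- ===== CLAIM (what is proved, stated in full; the proofs are below) =====
def Claim_equal_calc_py : Prop := ∀ (n : Int), Dom_calc_py n → Spec_calc_py n (calc_py n)

-- ===== LEMMAS AND PROOFS =====

theorem calcFuel_eq_foldr (fuel : Nat) (n : Int) :
    pvCalcFuel fuel n = (pvOpsFuel fuel n).foldr (fun b r => pvApply r b) 0 := by
  induction fuel generalizing n with
  | zero => simp [pvCalcFuel, pvOpsFuel]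
  | succ fuel ih =>
      rw [pvCalcFuel, pvOpsFuel]
      by_cases h0 : n = 0
      · simp [h0]
      · by_cases hpar : PySem.Int.mod n 2 = 0
        · simp only [if_neg h0, if_pos hpar, List.foldr_cons]
          rw [ih]
          rfl
        · simp only [if_neg h0, if_neg hpar, List.foldr_cons]
          rw [ih]
          rfl

-- ===== VERDICT (by name: the statement is the Claim_ definition above) =====
theorem calc_py_spec : Claim_equal_calc_py := by
  intro n _
  unfold Spec_calc_py calc_py_alt calc_py
  rw [List.foldl_reverse, calcFuel_eq_foldr]
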